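-- pv_equiv track=rewrite | github.com/pisterlabs/promptset | data/scraping-2.0/repos/aronweiler~CodeReviewer/src~refactor~code_refactor.py | get_combined_metadata
-- ===== SOURCE A (Python) =====
-- def get_combined_metadata(metadata_list):
--     combined_data = {}
--     for item in metadata_list:
--         file_path = item["file_path"]
--         refactored_code = item["code"]
--         combined_data.setdefault(file_path, []).append(refactored_code)
--
--     unique_result_list = []
--     for file_path, refactored_codes in combined_data.items():
--         combined_code = "\n".join(refactored_codes)
--         unique_result_list.append({"file_path": file_path, "combined_code": combined_code})
--
--     return unique_result_list
-- ===== SOURCE B (Python) =====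
-- def get_combined_metadata(metadata_list):
--     result = []
--     index = {}  # file_path -> position of its entry in result
--     for item in metadata_list:
--         file_path = item["file_path"]
--         code = item["code"]
--         i = index.get(file_path)
--         if i is None:
--             index[file_path] = len(result)
--             result.append({"file_path": file_path, "combined_code": code})
--         else:
--             entry = result[i]
--             entry["combined_code"] = entry["combined_code"] + "\n" + code
--     return result
-- ===== Notes on version B (the rewrite author's own statement) =====
-- stated objective: alternative
-- what changed: B replaces A's two-phase grouping (build a dict of code lists per path, then a second loop joining each list) with one pass that keeps an index from file_path to its row in the output and extends that row's combined_code string in place.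
import Mathlib
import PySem

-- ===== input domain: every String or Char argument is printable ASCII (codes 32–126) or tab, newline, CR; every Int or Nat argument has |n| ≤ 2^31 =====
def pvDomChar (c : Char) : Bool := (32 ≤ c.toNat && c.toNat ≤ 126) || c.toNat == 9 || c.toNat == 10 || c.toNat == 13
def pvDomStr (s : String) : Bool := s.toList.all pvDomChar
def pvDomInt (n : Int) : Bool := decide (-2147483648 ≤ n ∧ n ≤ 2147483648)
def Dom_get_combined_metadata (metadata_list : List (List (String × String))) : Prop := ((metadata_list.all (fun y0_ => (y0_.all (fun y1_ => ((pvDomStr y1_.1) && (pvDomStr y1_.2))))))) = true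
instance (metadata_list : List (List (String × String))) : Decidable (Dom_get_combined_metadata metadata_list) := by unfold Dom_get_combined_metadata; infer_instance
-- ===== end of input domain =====

-- B merges A's two passes (group codes per path, then join) into one pass that keeps, per
-- file path, the index of its output row and extends that row's combined_code in place
-- (objective: alternative; same return value).  B mutates only rows it created itself.

-- ===== PORT A =====
-- item[k] for the input dicts; under Pre_ the key is always present (Python raises KeyError otherwise)
def pvGetKey (item : List (String × String)) (k : String) : String :=
  ((PySem.Dict.mk item).get? k).getD ""

-- the output dict literal {"file_path": fp, "combined_code": "\n".join(codes)}
def pvRow (p : String × List String) : List (String × String) :=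
  [("file_path", p.1), ("combined_code", PySem.Str.join "\n" p.2)]

-- loop body of A's first loop: combined_data.setdefault(fp, []).append(code)
def pvStepA (d : PySem.Dict String (List String)) (item : List (String × String)) :
    PySem.Dict String (List String) :=
  d.modify (pvGetKey item "file_path") [] (fun l => l ++ [pvGetKey item "code"])

def get_combined_metadata (metadata_list : List (List (String × String))) :
    List (List (String × String)) :=
  let combined_data := metadata_list.foldl pvStepA PySem.Dict.empty
  combined_data.items.foldl (fun acc p => acc ++ [pvRow p]) []

-- ===== PORT B =====
-- loop body of B: look the path up in the index; extend the existing row or append a new one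
def pvStepB (st : List (List (String × String)) × PySem.Dict String Nat)
    (item : List (String × String)) :
    List (List (String × String)) × PySem.Dict String Nat :=
  match st.2.get? (pvGetKey item "file_path") with
  | none =>
      (st.1 ++ [[("file_path", pvGetKey item "file_path"),
                 ("combined_code", pvGetKey item "code")]],
       st.2.insert (pvGetKey item "file_path") st.1.length)
  | some i =>
      (st.1.modify i (fun entry =>
        ((PySem.Dict.mk entry).modify "combined_code" ""
          (fun s => s ++ "\n" ++ pvGetKey item "code")).items),
       st.2)

def get_combined_metadata_alt (metadata_list : List (List (String × String))) :
    List (List (String × String)) :=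
  (metadata_list.foldl pvStepB ([], PySem.Dict.empty)).1

-- ===== PRECONDITION & SPEC =====
-- Pre_ excludes exactly the inputs where an item lacks the "file_path" or "code" key,
-- on which the Python A raises KeyError.
def Pre_get_combined_metadata (metadata_list : List (List (String × String))) : Prop :=
  (metadata_list.all (fun item =>
    (PySem.Dict.mk item).contains "file_path" && (PySem.Dict.mk item).contains "code")) = true
instance (metadata_list : List (List (String × String))) : Decidable (Pre_get_combined_metadata metadata_list) := by unfold Pre_get_combined_metadata; infer_instance

def pvWitness_get_combined_metadata : (List (List (String × String))) :=
  [[("file_path", "a.py"), ("code", "x = 1")],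
   [("file_path", "a.py"), ("code", "y = 2")],
   [("file_path", "b.py"), ("code", "z")]]

def Spec_get_combined_metadata (metadata_list : List (List (String × String))) (out : List (List (String × String))) : Prop := out = get_combined_metadata_alt metadata_list
instance (metadata_list : List (List (String × String))) (out : List (List (String × String))) : Decidable (Spec_get_combined_metadata metadata_list out) := by unfold Spec_get_combined_metadata; infer_instance

-- ===== CLAIM (what is proved, stated in full; the proofs are below) =====
def Claim_equal_get_combined_metadata : Prop := ∀ (metadata_list : List (List (String × String))), Dom_get_combined_metadata metadata_list → Pre_get_combined_metadata metadata_list → Spec_get_combined_metadata metadata_list (get_combined_metadata metadata_list)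

-- ===== LEMMAS AND PROOFS =====

lemma pvJoin_singleton (s : String) : PySem.Str.join "\n" [s] = s := by
  simp [PySem.Str.join, PySem.Chars.join_singleton]

lemma pvCharsJoin_append_singleton (sep : List Char) (xs : List (List Char)) (c : List Char)
    (h : xs ≠ []) :
    PySem.Chars.join sep (xs ++ [c]) = PySem.Chars.join sep xs ++ sep ++ c := by
  induction xs with
  | nil => exact absurd rfl h
  | cons a t ih =>
    cases t with
    | nil => simp [PySem.Chars.join_cons_cons, PySem.Chars.join_singleton]
    | cons b r =>
      have ih' := ih (by simp)
      simp only [List.cons_append] at ih' ⊢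
      rw [PySem.Chars.join_cons_cons, ih', PySem.Chars.join_cons_cons]
      simp [List.append_assoc]

lemma pvJoin_append_singleton (l : List String) (s : String) (h : l ≠ []) :
    PySem.Str.join "\n" (l ++ [s]) = PySem.Str.join "\n" l ++ "\n" ++ s := by
  apply String.toList_inj.mp
  rw [String.toList_append, String.toList_append, PySem.Str.toList_join, PySem.Str.toList_join,
      show (l ++ [s]).map String.toList = l.map String.toList ++ [s.toList] by simp,
      pvCharsJoin_append_singleton _ _ _ (by simpa using h)]

-- f(row) for the existing-path branch of B, computed on a literal row
lemma pvEntry_update (fp j c : String) :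
    ((PySem.Dict.mk [("file_path", fp), ("combined_code", j)]).modify "combined_code" ""
        (fun s => s ++ "\n" ++ c)).items
      = [("file_path", fp), ("combined_code", j ++ "\n" ++ c)] := by
  simp [PySem.Dict.modify, PySem.Dict.getD_eq_get?_getD, PySem.Dict.get?_mk_cons,
        PySem.Dict.items_insert_of_contains, PySem.Dict.contains_mk]

-- the invariant linking A's dict of code lists to B's (rows, index) state
def pvInv (d : PySem.Dict String (List String))
    (st : List (List (String × String)) × PySem.Dict String Nat) : Prop :=
  st.1 = d.items.map pvRow ∧
  d.keys.Nodup ∧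
  (∀ p ∈ d.items, p.2 ≠ []) ∧
  (∀ k : String,
    (st.2.get? k = none → d.contains k = false) ∧
    (∀ i, st.2.get? k = some i → ∃ h : i < d.items.length, (d.items[i]).1 = k))

lemma pvKeys_getElem (d : PySem.Dict String (List String)) (i : Nat) (h : i < d.items.length) :
    d.keys[i]'(by simpa [PySem.Dict.keys] using h) = (d.items[i]).1 := by
  simp [PySem.Dict.keys]

lemma pvStep_inv (d : PySem.Dict String (List String))
    (st : List (List (String × String)) × PySem.Dict String Nat)
    (item : List (String × String)) (h : pvInv d st) :
    pvInv (pvStepA d item) (pvStepB st item) := by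
  obtain ⟨hres, hnd, hne, hidx⟩ := h
  have hlen : st.1.length = d.items.length := by rw [hres]; simp
  unfold pvStepA pvStepB
  cases hg : st.2.get? (pvGetKey item "file_path") with
  | none =>
    simp only []
    set fp := pvGetKey item "file_path" with hfp
    set code := pvGetKey item "code" with hcode
    have hc : d.contains fp = false := (hidx fp).1 hg
    have hitems : (d.modify fp [] (fun l => l ++ [code])).items = d.items ++ [(fp, [code])] := by
      unfold PySem.Dict.modify
      rw [PySem.Dict.getD_of_not_contains d [] hc]
      exact PySem.Dict.items_insert_of_not_contains d _ hc
    refine ⟨?_, ?_, ?_, ?_⟩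
    · rw [hitems, hres]
      simp [pvRow, pvJoin_singleton]
    · rw [show (d.modify fp [] (fun l => l ++ [code])).keys
            = (d.insert fp ((fun l => l ++ [code]) (d.getD fp []))).keys from
          PySem.Dict.keys_modify d fp [] _]
      exact PySem.Dict.nodup_keys_insert d _ _ hnd
    · rw [hitems]
      intro p hp
      rcases List.mem_append.mp hp with hp | hp
      · exact hne p hp
      · simp at hp; rw [hp]; simp
    · intro k
      constructor
      · intro hk
        rw [PySem.Dict.get?_insert] at hk
        split at hk
        · exact absurd hk (by simp)
        · rw [PySem.Dict.contains_modify]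
          have := (hidx k).1 hk
          simp_all
      · intro i hk
        rw [PySem.Dict.get?_insert] at hk
        rw [hitems]
        split at hk
        · rename_i hkfp
          have hi : i = d.items.length := by
            rw [← hlen]; exact (Option.some.inj hk).symm
          subst hi
          subst hkfp
          refine ⟨by simp, ?_⟩
          simp
        · obtain ⟨hlt, hfst⟩ := (hidx k).2 i hk
          refine ⟨by simp; omega, ?_⟩
          rw [List.getElem_append_left hlt]
          exact hfst
  | some i =>
    simp only []
    set fp := pvGetKey item "file_path" with hfp
    set code := pvGetKey item "code" with hcode
    obtain ⟨hi, hki⟩ := (hidx fp).2 i hg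
    have hitem_eq : d.items[i] = (fp, (d.items[i]).2) := by
      cases hp : d.items[i]
      simp_all
    have hmem : (fp, (d.items[i]).2) ∈ d.items := hitem_eq ▸ List.getElem_mem hi
    have hcont : d.contains fp = true := by
      rw [PySem.Dict.contains_iff_mem_keys]
      have : (fp, (d.items[i]).2).1 ∈ d.items.map Prod.fst := List.mem_map_of_mem hmem
      simpa [PySem.Dict.keys] using this
    have hold : d.getD fp [] = (d.items[i]).2 := PySem.Dict.getD_of_mem_items d hmem hnd []
    have holdne : (d.items[i]).2 ≠ [] := hne (fp, (d.items[i]).2) hmem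
    have hitems : (d.modify fp [] (fun l => l ++ [code])).items
        = d.items.map (fun p => if (p.1 == fp) = true then (fp, (d.items[i]).2 ++ [code]) else p) := by
      unfold PySem.Dict.modify
      rw [hold]
      exact PySem.Dict.items_insert_of_contains d _ hcont
    have hinj : ∀ j (hj : j < d.items.length), (d.items[j]).1 = fp → j = i := by
      intro j hj hjfp
      have hndk : d.keys.Nodup := hnd
      have h1 : d.keys[j]'(by simpa [PySem.Dict.keys] using hj)
          = d.keys[i]'(by simpa [PySem.Dict.keys] using hi) := by
        rw [pvKeys_getElem d j hj, pvKeys_getElem d i hi, hjfp, hki]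
      exact List.Nodup.getElem_inj_iff hndk |>.mp h1
    refine ⟨?_, ?_, ?_, ?_⟩
    · rw [hitems, hres]
      apply List.ext_getElem
      · simp
      · intro j hj1 hj2
        rw [List.getElem_modify]
        by_cases hij : i = j
        · subst hij
          rw [if_pos rfl]
          simp only [List.getElem_map]
          rw [hitem_eq]
          simp [pvRow, pvEntry_update, pvJoin_append_singleton _ _ holdne]
        · simp only [List.getElem_map]
          have hj : j < d.items.length := by simpa using hj2
          have : ((d.items[j]).1 == fp) = false := by
            by_contra hx
            simp only [Bool.not_eq_false, beq_iff_eq] at hx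
            exact hij (hinj j hj hx).symm
          rw [if_neg hij, this]
          simp
    · rw [show (d.modify fp [] (fun l => l ++ [code])).keys
            = (d.insert fp ((fun l => l ++ [code]) (d.getD fp []))).keys from
          PySem.Dict.keys_modify d fp [] _]
      rw [PySem.Dict.keys_insert_of_contains d _ hcont]
      exact hnd
    · rw [hitems]
      intro p hp
      obtain ⟨q, hq, hqe⟩ := List.mem_map.mp hp
      split at hqe
      · rw [← hqe]; simp
      · rw [← hqe]; exact hne q hq
    · intro k
      constructor
      · intro hk
        rw [PySem.Dict.contains_modify]
        have hkfp : (k == fp) = false := by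
          by_contra hx
          simp only [Bool.not_eq_false, beq_iff_eq] at hx
          rw [hx, hg] at hk
          exact absurd hk (by simp)
        rw [hkfp, (hidx k).1 hk]
        simp
      · intro j hk
        obtain ⟨hlt, hfst⟩ := (hidx k).2 j hk
        rw [hitems]
        refine ⟨by simpa using hlt, ?_⟩
        rw [List.getElem_map]
        split
        · rename_i hx
          simp only [beq_iff_eq] at hx
          rw [← hfst, hx]
        · exact hfst

lemma pvFold_inv (ml : List (List (String × String)))
    (d : PySem.Dict String (List String))
    (st : List (List (String × String)) × PySem.Dict String Nat) (h : pvInv d st) :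
    pvInv (ml.foldl pvStepA d) (ml.foldl pvStepB st) := by
  induction ml generalizing d st with
  | nil => exact h
  | cons a t ih => exact ih _ _ (pvStep_inv d st a h)

lemma pvInv_init : pvInv PySem.Dict.empty ([], PySem.Dict.empty) := by
  refine ⟨by simp [PySem.Dict.empty], by simp [PySem.Dict.empty, PySem.Dict.keys], ?_, ?_⟩
  · intro p hp; simp [PySem.Dict.empty] at hp
  · intro k
    refine ⟨fun _ => ?_, fun i hk => ?_⟩
    · simp [PySem.Dict.empty, PySem.Dict.contains]
    · simp [PySem.Dict.empty, PySem.Dict.get?] at hk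

-- ===== VERDICT (by name: the statement is the Claim_ definition above) =====
theorem get_combined_metadata_spec : Claim_equal_get_combined_metadata := by
  intro ml _ _
  unfold Spec_get_combined_metadata get_combined_metadata get_combined_metadata_alt
  have h := pvFold_inv ml PySem.Dict.empty ([], PySem.Dict.empty) pvInv_init
  rw [PySem.List.foldl_append_singleton_eq_map pvRow _ []]
  rw [← h.1]
  simp
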